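-- pv_equiv track=rewrite | github.com/Kailash913/Land-analysis-v2 | backend/integrations/tn_guideline_values.py | _fuzzy_get
-- ===== SOURCE A (Python) =====
-- def _fuzzy_get(data: dict, key: str):
--     """Case-insensitive fuzzy key lookup."""
--     if not key or not data:
--         return None
--     key_lower = key.lower().strip()
--
--     # Exact match
--     for k, v in data.items():
--         if k.lower() == key_lower:
--             return v
--
--     # Substring match
--     for k, v in data.items():
--         if k == "_default":
--             continue
--         if key_lower in k.lower() or k.lower() in key_lower:
--             return v
--
--     return None
-- ===== SOURCE B (Python) =====
-- def _fuzzy_get(data: dict, key: str):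
--     """Case-insensitive fuzzy key lookup (single pass with a pending substring candidate)."""
--     if not key or not data:
--         return None
--     key_lower = key.lower().strip()
--     sub_match = None
--     for k, v in data.items():
--         kl = k.lower()
--         if kl == key_lower:
--             return v
--         if sub_match is None and k != "_default" and (key_lower in kl or kl in key_lower):
--             sub_match = v
--     return sub_match
-- ===== Notes on version B (the rewrite author's own statement) =====
-- stated objective: alternative
-- what changed: Replaces A's two sequential scans (exact pass, then substring pass) with one single pass over the items that returns immediately on an exact match and carries the first substring candidate in a pending variable returned after the loop.
import Mathlib
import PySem

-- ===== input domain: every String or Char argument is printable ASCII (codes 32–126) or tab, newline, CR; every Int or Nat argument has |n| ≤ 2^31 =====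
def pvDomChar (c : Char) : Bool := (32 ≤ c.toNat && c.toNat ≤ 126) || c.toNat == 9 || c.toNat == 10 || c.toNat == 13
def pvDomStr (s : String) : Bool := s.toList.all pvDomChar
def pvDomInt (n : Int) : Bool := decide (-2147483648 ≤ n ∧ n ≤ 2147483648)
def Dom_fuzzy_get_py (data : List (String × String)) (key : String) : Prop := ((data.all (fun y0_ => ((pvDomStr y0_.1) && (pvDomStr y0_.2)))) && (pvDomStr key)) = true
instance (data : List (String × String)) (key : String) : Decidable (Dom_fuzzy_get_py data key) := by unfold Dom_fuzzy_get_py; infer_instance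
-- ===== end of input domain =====

-- B replaces A's two sequential scans with one pass that returns on an exact match and
-- carries the first substring candidate in a pending accumulator (objective: alternative).


-- ===== PORT A =====
-- first loop of A: return v for the first k with k.lower() == key_lower
def fgExact (keyLower : String) : List (String × String) → Option String
  | [] => none
  | (k, v) :: rest =>
    if PySem.Str.lower k = keyLower then some v else fgExact keyLower rest

-- second loop of A: skip "_default", return v for the first substring match
def fgSub (keyLower : String) : List (String × String) → Option String
  | [] => none
  | (k, v) :: rest =>
    if k = "_default" then fgSub keyLower rest
    else if PySem.Str.isIn keyLower (PySem.Str.lower k) || PySem.Str.isIn (PySem.Str.lower k) keyLower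
    then some v
    else fgSub keyLower rest

def fuzzy_get_py (data : List (String × String)) (key : String) : Option String :=
  if key = "" ∨ data = [] then none
  else
    let keyLower := PySem.Str.strip (PySem.Str.lower key)
    match fgExact keyLower data with
    | some v => some v
    | none => fgSub keyLower data

-- ===== PORT B =====
-- B's single loop: immediate return on exact match, pending substring candidate otherwise
def fgLoop (keyLower : String) (subMatch : Option String) : List (String × String) → Option String
  | [] => subMatch
  | (k, v) :: rest =>
    let kl := PySem.Str.lower k
    if kl = keyLower then some v
    else
      fgLoop keyLower
        (if subMatch.isNone && k ≠ "_default" &&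
            (PySem.Str.isIn keyLower kl || PySem.Str.isIn kl keyLower)
         then some v else subMatch) rest

def fuzzy_get_py_alt (data : List (String × String)) (key : String) : Option String :=
  if key = "" ∨ data = [] then none
  else fgLoop (PySem.Str.strip (PySem.Str.lower key)) none data

-- ===== PRECONDITION & SPEC =====
def Spec_fuzzy_get_py (data : List (String × String)) (key : String) (out : Option String) : Prop := out = fuzzy_get_py_alt data key
instance (data : List (String × String)) (key : String) (out : Option String) : Decidable (Spec_fuzzy_get_py data key out) := by unfold Spec_fuzzy_get_py; infer_instance

-- ===== CLAIM (what is proved, stated in full; the proofs are below) =====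
def Claim_equal_fuzzy_get_py : Prop := ∀ (data : List (String × String)) (key : String), Dom_fuzzy_get_py data key → Spec_fuzzy_get_py data key (fuzzy_get_py data key)

-- ===== LEMMAS AND PROOFS =====

-- invariant of B's loop: it is A's exact scan, or-else the pending candidate, or-else A's substring scan
theorem fgLoop_eq (keyLower : String) (xs : List (String × String)) :
    ∀ subMatch, fgLoop keyLower subMatch xs
      = ((fgExact keyLower xs).or (subMatch.or (fgSub keyLower xs))) := by
  induction xs with
  | nil => intro s; simp [fgLoop, fgExact, fgSub]
  | cons p rest ih =>
    intro s
    obtain ⟨k, v⟩ := p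
    simp only [fgLoop, fgExact, fgSub]
    by_cases hx : PySem.Str.lower k = keyLower
    · simp [hx]
    · simp only [hx, if_false, ih]
      cases s with
      | some w => simp
      | none =>
        by_cases hd : k = "_default"
        · simp [hd]
        · simp only [hd]
          split <;> simp_all

-- ===== VERDICT (by name: the statement is the Claim_ definition above) =====
theorem fuzzy_get_py_spec : Claim_equal_fuzzy_get_py := by
  intro data key _
  unfold Spec_fuzzy_get_py fuzzy_get_py fuzzy_get_py_alt
  by_cases h : key = "" ∨ data = []
  · simp [h]
  · simp only [h, if_false, fgLoop_eq]
    cases fgExact (PySem.Str.strip (PySem.Str.lower key)) data <;> simp
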